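-- pv_equiv track=rewrite | github.com/columbia/appflow | src/util.py | url_to_actname
-- ===== SOURCE A (Python) =====
-- def url_to_actname(url):
--     for i in range(len(url)):
--         if i > 0 and url[i] >= 'a' and url[i] <= 'z':
--             if not url[i - 1].isalpha():
--                 url = url[:i] + url[i].upper() + url[i + 1:]
--
--     url = url.split('//', 1)[-1].split('?', 1)[0].split('#', 1)[0]
--     if '/' in url:
--         (urlhost, urlpath) = url.split('/', 1)
--         urlpath = '.'.join(urlpath.split('/'))
--         return "%s.%s" % (urlhost, urlpath)
--     else:
--         return url.replace('/', '.')
-- ===== SOURCE B (Python) =====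
-- def url_to_actname(url):
--     # single left-to-right pass building a new string; prev carries the previous
--     # original character (uppercasing never changes isalpha(), so this matches
--     # A's in-place rewriting loop)
--     out = []
--     prev = None
--     for c in url:
--         out.append(c.upper() if prev is not None and 'a' <= c <= 'z' and not prev.isalpha() else c)
--         prev = c
--     url = ''.join(out)
--
--     url = url.split('//', 1)[-1].split('?', 1)[0].split('#', 1)[0]
--     if '/' in url:
--         (urlhost, urlpath) = url.split('/', 1)
--         urlpath = '.'.join(urlpath.split('/'))
--         return "%s.%s" % (urlhost, urlpath)
--     else:
--         return url.replace('/', '.')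
-- ===== Notes on version B (the rewrite author's own statement) =====
-- stated objective: alternative
-- what changed: The capitalization phase no longer rebuilds the whole string by slicing at every hit; B makes one pass that pairs each character with its predecessor and appends the (possibly uppercased) character to an output buffer, which is correct because uppercasing a letter never changes isalpha() of the predecessor; the URL-splitting phase is unchanged.
import Mathlib
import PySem

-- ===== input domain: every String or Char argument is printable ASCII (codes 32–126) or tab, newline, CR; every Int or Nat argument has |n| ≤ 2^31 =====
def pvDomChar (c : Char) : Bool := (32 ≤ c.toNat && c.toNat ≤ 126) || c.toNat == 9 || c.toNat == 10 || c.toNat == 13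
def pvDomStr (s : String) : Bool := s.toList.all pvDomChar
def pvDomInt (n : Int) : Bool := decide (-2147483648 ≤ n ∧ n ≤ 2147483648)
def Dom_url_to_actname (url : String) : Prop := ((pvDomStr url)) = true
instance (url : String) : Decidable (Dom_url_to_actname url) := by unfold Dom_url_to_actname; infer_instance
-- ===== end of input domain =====

-- B replaces A's slice-and-rebuild capitalization loop by a single pass carrying the previous
-- character (uppercasing never changes isalpha()); the URL-splitting phase is unchanged.

-- ===== PORT A =====
-- phase 2 (the '//'/'?'/'#'/'/' splitting) is textually identical in both Pythons; shared helper
def pvPhase2 (cs0 : List Char) : String :=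
  let cs1 := (PySem.Chars.splitOnMax cs0 ['/', '/'] 1).getLastD []
  let cs2 := (PySem.Chars.splitOnMax cs1 ['?'] 1).headD []
  let cs := (PySem.Chars.splitOnMax cs2 ['#'] 1).headD []
  if PySem.Chars.isIn ['/'] cs = true then
    let parts := PySem.Chars.splitOnMax cs ['/'] 1
    String.ofList (parts.headD [] ++ ['.'] ++ PySem.Chars.join ['.'] (PySem.Chars.splitOn (parts.getLastD []) ['/']))
  else
    String.ofList (PySem.Chars.replace cs ['/'] ['.'])

-- one iteration of A's 'for i in range(len(url))' loop (index always in range: the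
-- rewriting 'url[:i] + url[i].upper() + url[i+1:]' preserves the length, so the
-- pyGetD default ' ' is never used)
def pvStepA (u : List Char) (i : Int) : List Char :=
  if 0 < i ∧ 'a' ≤ PySem.List.pyGetD u i ' ' ∧ PySem.List.pyGetD u i ' ' ≤ 'z' then
    if PySem.Chars.isalpha (PySem.List.pyGetD u (i - 1) ' ') = false then
      PySem.Chars.slice u none (some i) ++ [PySem.Chars.upperChar (PySem.List.pyGetD u i ' ')]
        ++ PySem.Chars.slice u (some (i + 1)) none
    else u
  else u

def url_to_actname (url : String) : String :=
  pvPhase2 ((PySem.List.pyRange 0 (PySem.Str.len url) 1).foldl pvStepA url.toList)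

-- ===== PORT B =====
-- one iteration of B's single pass: state = (output built so far, previous character)
def pvStepB (st : List Char × Option Char) (c : Char) : List Char × Option Char :=
  (st.1 ++ [match st.2 with
            | none => c
            | some p =>
              if ('a' ≤ c ∧ c ≤ 'z') ∧ PySem.Chars.isalpha p = false then PySem.Chars.upperChar c
              else c],
   some c)

def url_to_actname_alt (url : String) : String :=
  pvPhase2 (url.toList.foldl pvStepB ([], none)).1

-- ===== PRECONDITION & SPEC =====
def Spec_url_to_actname (url : String) (out : String) : Prop := out = url_to_actname_alt url
instance (url : String) (out : String) : Decidable (Spec_url_to_actname url out) := by unfold Spec_url_to_actname; infer_instance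

-- ===== CLAIM (what is proved, stated in full; the proofs are below) =====
def Claim_equal_url_to_actname : Prop := ∀ (url : String), Dom_url_to_actname url → Spec_url_to_actname url (url_to_actname url)

-- ===== LEMMAS AND PROOFS =====

-- the character both loops write at a position whose predecessor is p
def pvUp (p : Option Char) (c : Char) : Char :=
  match p with
  | none => c
  | some q => if ('a' ≤ c ∧ c ≤ 'z') ∧ PySem.Chars.isalpha q = false then PySem.Chars.upperChar c else c

-- the common result of phase 1, with the previous character threaded through
def pvF : Option Char → List Char → List Char
  | _, [] => []
  | p, c :: t => pvUp p c :: pvF (some c) t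

-- the previous character after consuming l, starting from p
def pvLastP (p : Option Char) (l : List Char) : Option Char := l.getLast?.or p

theorem pvF_length (p : Option Char) (l : List Char) : (pvF p l).length = l.length := by
  induction l generalizing p with
  | nil => rfl
  | cons c t ih => simp [pvF, ih]

theorem pvChar_le_iff (a b : Char) : (a ≤ b) ↔ a.toNat ≤ b.toNat := by
  rw [Char.le_def, UInt32.le_iff_toNat_le]; rfl

theorem pvUp_isalpha (p : Option Char) (c : Char) :
    PySem.Chars.isalpha (pvUp p c) = PySem.Chars.isalpha c := by
  match p with
  | none => rfl
  | some q =>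
    simp only [pvUp]
    split_ifs with h
    · have hc : 'a' ≤ c ∧ c ≤ 'z' := h.1
      have h1 : 97 ≤ c.toNat ∧ c.toNat ≤ 122 :=
        ⟨(pvChar_le_iff 'a' c).mp hc.1, (pvChar_le_iff c 'z').mp hc.2⟩
      have hlow : PySem.Chars.islower c = true := by
        simp [PySem.Chars.islower, hc.1, hc.2]
      have hval : (Char.ofNat (c.toNat - 32)).toNat = c.toNat - 32 := by
        rw [Char.toNat_ofNat]
        have hv : (c.toNat - 32).isValidChar := by unfold Nat.isValidChar; omega
        simp [hv]
      have hup : PySem.Chars.upperChar c = Char.ofNat (c.toNat - 32) := by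
        rw [PySem.Chars.upperChar, if_pos hlow]
      have ha2 : PySem.Chars.isupper (Char.ofNat (c.toNat - 32)) = true := by
        have hA : 'A' ≤ Char.ofNat (c.toNat - 32) := by
          rw [pvChar_le_iff, hval]; show 65 ≤ _; omega
        have hZ : Char.ofNat (c.toNat - 32) ≤ 'Z' := by
          rw [pvChar_le_iff, hval]; show _ ≤ 90; omega
        simp [PySem.Chars.isupper, hA, hZ]
      rw [hup]
      simp [PySem.Chars.isalpha, ha2, hlow]
    · rfl

theorem pvF_map_isalpha (p : Option Char) (l : List Char) :
    (pvF p l).map PySem.Chars.isalpha = l.map PySem.Chars.isalpha := by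
  induction l generalizing p with
  | nil => rfl
  | cons c t ih => simp [pvF, pvUp_isalpha, ih]

theorem pvLastP_cons (p : Option Char) (c : Char) (t : List Char) :
    pvLastP p (c :: t) = pvLastP (some c) t := by
  cases t with
  | nil => rfl
  | cons d u =>
    rw [pvLastP, pvLastP, List.getLast?_cons_cons]
    cases h : (d :: u).getLast? with
    | none => exact absurd (List.getLast?_eq_none_iff.mp h) (by simp)
    | some y => simp

theorem pvF_append (p : Option Char) (l1 l2 : List Char) :
    pvF p (l1 ++ l2) = pvF p l1 ++ pvF (pvLastP p l1) l2 := by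
  induction l1 generalizing p with
  | nil => simp [pvF, pvLastP]
  | cons c t ih => simp [pvF, ih (some c), pvLastP_cons]

-- B's loop computes pvF
theorem pvFoldB (t acc : List Char) (p : Option Char) :
    t.foldl pvStepB (acc, p) = (acc ++ pvF p t, pvLastP p t) := by
  induction t generalizing acc p with
  | nil => simp [pvLastP, pvF]
  | cons c u ih =>
    have : pvStepB (acc, p) c = (acc ++ [pvUp p c], some c) := by
      cases p <;> simp [pvStepB, pvUp]
    simp only [List.foldl_cons, this, ih, pvF, pvLastP_cons]
    simp [pvLastP]

-- isalpha of a character of pvF agrees with the original character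
theorem pvF_isalpha_getElem? (p : Option Char) (l : List Char) (i : Nat) :
    ((pvF p l)[i]?).map PySem.Chars.isalpha = (l[i]?).map PySem.Chars.isalpha := by
  have h := pvF_map_isalpha p l
  have := congrArg (fun xs => xs[i]?) h
  simpa [List.getElem?_map] using this

-- A's loop, started after an already-processed prefix, computes pvF
theorem pvFoldA (suf pre : List Char) :
    (PySem.List.pyRange (pre.length : Int) ((pre.length : Int) + suf.length) 1).foldl pvStepA
      (pvF none pre ++ suf) = pvF none (pre ++ suf) := by
  induction suf generalizing pre with
  | nil =>
    simp [PySem.List.pyRange]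
  | cons c t ih =>
    have hlt : (pre.length : Int) < (pre.length : Int) + (c :: t).length := by
      simp
    rw [PySem.List.pyRange_one_cons hlt, List.foldl_cons]
    have hstep : pvStepA (pvF none pre ++ c :: t) (pre.length : Int) = pvF none (pre ++ [c]) ++ t := by
      have hlenF : (pvF none pre).length = pre.length := pvF_length none pre
      have hget : PySem.List.pyGetD (pvF none pre ++ c :: t) (pre.length : Int) ' ' = c := by
        rw [PySem.List.pyGetD_natCast]
        simp [List.getD, ← hlenF]
      rw [pvF_append]
      cases hpre : pre with
      | nil =>
        subst hpre
        simp [pvStepA, pvF, pvLastP, pvUp]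
      | cons q r =>
        rw [← hpre]
        have hprene : pre ≠ [] := by simp [hpre]
        have hpos : (0 : Int) < (pre.length : Int) := by
          simp [hpre]
        -- the previous character in the current state
        have hprev : PySem.List.pyGetD (pvF none pre ++ c :: t) ((pre.length : Int) - 1) ' '
            = (pvF none pre).getD (pre.length - 1) ' ' := by
          have h1 : ((pre.length : Int) - 1) = ((pre.length - 1 : Nat) : Int) := by
            have : pre.length ≠ 0 := by simp [hpre]
            omega
          rw [h1, PySem.List.pyGetD_natCast]
          have h2 : pre.length - 1 < (pvF none pre).length := by
            rw [hlenF]; simp [hpre]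
          simp [List.getD, List.getElem?_append_left h2]
        -- pvLastP none pre is the last original character
        obtain ⟨x, hx⟩ : ∃ x, pre.getLast? = some x := by
          cases h : pre.getLast? with
          | none => exact absurd (List.getLast?_eq_none_iff.mp h) hprene
          | some x => exact ⟨x, rfl⟩
        have hlastP : pvLastP none pre = some x := by simp [pvLastP, hx]
        have hxel : pre[pre.length - 1]? = some x := by
          rw [← List.getLast?_eq_getElem?]; exact hx
        -- isalpha of the rewritten predecessor equals isalpha of the original one
        have halpha : PySem.Chars.isalpha ((pvF none pre).getD (pre.length - 1) ' ')
            = PySem.Chars.isalpha x := by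
          have h := pvF_isalpha_getElem? none pre (pre.length - 1)
          rw [hxel] at h
          obtain ⟨y, hy⟩ : ∃ y, (pvF none pre)[pre.length - 1]? = some y := by
            have h2 : pre.length - 1 < (pvF none pre).length := by
              rw [hlenF]; simp [hpre]
            exact ⟨(pvF none pre)[pre.length - 1], List.getElem?_eq_getElem h2⟩
          rw [hy] at h
          simp only [Option.map_some, Option.some.injEq] at h
          simp [List.getD, hy, h]
        have hslice1 : PySem.Chars.slice (pvF none pre ++ c :: t) none (some (pre.length : Int))
            = pvF none pre := by
          rw [PySem.Chars.slice, PySem.List.slice_to _ (by positivity)]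
          rw [Int.toNat_natCast, ← hlenF, List.take_left]
        have hslice2 : PySem.Chars.slice (pvF none pre ++ c :: t) (some ((pre.length : Int) + 1)) none
            = t := by
          rw [PySem.Chars.slice, PySem.List.slice_from _ (by positivity)]
          have h2 : ((pre.length : Int) + 1).toNat = (pvF none pre ++ [c]).length := by
            simp [hlenF]
          rw [h2, show pvF none pre ++ c :: t = (pvF none pre ++ [c]) ++ t by simp,
            List.drop_left]
        simp only [pvStepA, hget, hprev, halpha, hlastP, pvF, pvUp, hpos, true_and]
        by_cases hc : 'a' ≤ c ∧ c ≤ 'z'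
        · by_cases ha : PySem.Chars.isalpha x = false
          · rw [if_pos hc, if_pos ha, if_pos ⟨hc, ha⟩, hslice1, hslice2]
          · rw [if_pos hc, if_neg ha, if_neg (by tauto)]; simp
        · rw [if_neg hc, if_neg (by tauto)]; simp
    rw [hstep]
    have harith : (pre.length : Int) + (c :: t).length = ((pre ++ [c]).length : Int) + t.length := by
      simp; omega
    have hlen1 : (pre.length : Int) + 1 = ((pre ++ [c]).length : Int) := by simp
    rw [hlen1, harith, ih (pre ++ [c])]
    simp

-- ===== VERDICT (by name: the statement is the Claim_ definition above) =====
theorem url_to_actname_spec : Claim_equal_url_to_actname := by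
  intro url _
  unfold Spec_url_to_actname url_to_actname url_to_actname_alt
  congr 1
  have hA := pvFoldA url.toList []
  simp only [List.length_nil, Nat.cast_zero, pvF, List.nil_append, zero_add] at hA
  rw [PySem.Str.len_eq, hA, pvFoldB]
  simp
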